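-- pv_equiv track=rewrite | github.com/tiger965/Tiger-System-Rebuild | database/success_calculator.py | _calculate_win_streak
-- ===== SOURCE A (Python) =====
-- from typing import Dict, List, Optional, Tuple
--
-- def _calculate_win_streak(trades: List[Dict]) -> int:
--     """计算最大连胜"""
--     if not trades:
--         return 0
--
--     max_streak = 0
--     current_streak = 0
--
--     for trade in trades:
--         if trade.get('pnl', 0) > 0:
--             current_streak += 1
--             max_streak = max(max_streak, current_streak)
--         else:
--             current_streak = 0
--
--     return max_streak
-- ===== SOURCE B (Python) =====
-- from itertools import groupby
--
-- def _calculate_win_streak(trades):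
--     """计算最大连胜"""
--     return max((sum(1 for _ in g)
--                 for k, g in groupby(trades, key=lambda t: t.get('pnl', 0) > 0)
--                 if k),
--                default=0)
-- ===== Notes on version B (the rewrite author's own statement) =====
-- stated objective: idiomatic
-- what changed: Replaces the running max/current-streak counter scan with itertools.groupby: form maximal runs of same-sign trades and take the max length over the winning runs (default=0).
import Mathlib
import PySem

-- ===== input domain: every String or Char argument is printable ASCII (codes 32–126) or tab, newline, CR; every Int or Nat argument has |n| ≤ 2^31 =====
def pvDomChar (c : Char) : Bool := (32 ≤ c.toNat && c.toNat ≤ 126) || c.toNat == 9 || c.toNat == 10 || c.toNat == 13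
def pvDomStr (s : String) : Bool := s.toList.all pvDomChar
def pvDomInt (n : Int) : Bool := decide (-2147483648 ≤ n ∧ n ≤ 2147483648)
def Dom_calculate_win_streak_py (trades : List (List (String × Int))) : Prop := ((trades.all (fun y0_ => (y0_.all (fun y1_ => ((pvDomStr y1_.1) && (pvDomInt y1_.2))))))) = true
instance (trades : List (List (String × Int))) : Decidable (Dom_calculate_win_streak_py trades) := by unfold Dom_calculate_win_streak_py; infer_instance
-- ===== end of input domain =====

-- B replaces A's running max/current-streak counter with a groupby-style decomposition:
-- split the win/loss key sequence into maximal runs, take max length over winning runs (default 0).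


-- ===== PORT A =====
-- for trade in trades: if trade.get('pnl', 0) > 0: current += 1; max = max(max, current) else current = 0
def calculate_win_streak_py (trades : List (List (String × Int))) : Int :=
  if trades = [] then 0
  else
    (trades.foldl
      (fun (s : Int × Int) trade =>
        if (PySem.Dict.mk trade).getD "pnl" (0 : Int) > 0 then
          (max s.1 (s.2 + 1), s.2 + 1)
        else
          (s.1, 0))
      (0, 0)).1

-- ===== PORT B =====
-- groupby on the key sequence: maximal runs of equal keys, as (key, run length) pairs
def bRuns : List Bool → List (Bool × Nat)
  | [] => []
  | b :: bs =>
    (b, (bs.takeWhile (· == b)).length + 1) :: bRuns (bs.dropWhile (· == b))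
termination_by l => l.length
decreasing_by
  simp
  exact List.length_dropWhile_le _ _

-- max((sum(1 for _ in g) for k, g in groupby(trades, key=λt. t.get('pnl',0)>0) if k), default=0)
def calculate_win_streak_py_alt (trades : List (List (String × Int))) : Int :=
  let keys := trades.map (fun t => decide ((PySem.Dict.mk t).getD "pnl" (0 : Int) > 0))
  let lens := ((bRuns keys).filter (fun p => p.1)).map (fun p => (p.2 : Int))
  (PySem.List.max? lens (fun x => x)).getD 0

-- ===== PRECONDITION & SPEC =====
def Spec_calculate_win_streak_py (trades : List (List (String × Int))) (out : Int) : Prop := out = calculate_win_streak_py_alt trades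
instance (trades : List (List (String × Int))) (out : Int) : Decidable (Spec_calculate_win_streak_py trades out) := by unfold Spec_calculate_win_streak_py; infer_instance

-- ===== CLAIM (what is proved, stated in full; the proofs are below) =====
def Claim_equal_calculate_win_streak_py : Prop := ∀ (trades : List (List (String × Int))), Dom_calculate_win_streak_py trades → Spec_calculate_win_streak_py trades (calculate_win_streak_py trades)

-- ===== LEMMAS AND PROOFS =====

-- A's loop, on the key sequence
def bStep (s : Int × Int) (b : Bool) : Int × Int :=
  if b then (max s.1 (s.2 + 1), s.2 + 1) else (s.1, 0)

-- A's result as a simple recursion: best c bs = the final max_streak starting with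
-- current streak c (and max so far = c), i.e. the best streak reachable in c-prefix ++ bs
def best : Int → List Bool → Int
  | c, [] => c
  | c, true :: bs => best (c + 1) bs
  | c, false :: bs => max c (best 0 bs)

-- B's result on the key sequence
def bVal (bs : List Bool) : Int :=
  (PySem.List.max? (((bRuns bs).filter (fun p => p.1)).map (fun p => (p.2 : Int))) (fun x => x)).getD 0

theorem best_ge (bs : List Bool) : ∀ c : Int, c ≤ best c bs := by
  induction bs with
  | nil => intro c; simp [best]
  | cons b bs ih =>
    intro c
    cases b
    · simpa [best] using le_max_left c (best 0 bs)
    · have := ih (c + 1); simp [best]; omega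

theorem foldA_eq (bs : List Bool) : ∀ m c : Int, 0 ≤ c → c ≤ m →
    (bs.foldl bStep (m, c)).1 = max m (best c bs) := by
  induction bs with
  | nil => intro m c h0 hcm; simp [best]; omega
  | cons b bs ih =>
    intro m c h0 hcm
    cases b
    · have h := ih m 0 le_rfl (by omega)
      have hge := best_ge bs (0 : Int)
      simp only [List.foldl_cons, bStep, best, Bool.false_eq_true, if_false]
      rw [h]
      simp only [max_def]; split_ifs <;> omega
    · have h := ih (max m (c + 1)) (c + 1) (by omega) (le_max_right _ _)
      have hge := best_ge bs (c + 1)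
      simp only [List.foldl_cons, bStep, best, reduceIte]
      rw [h]
      simp only [max_def]; split_ifs <;> omega

theorem best_run_true (t : List Bool) (ht : ∀ x ∈ t, x = true) :
    ∀ (c : Int) (rest : List Bool), best c (t ++ rest) = best (c + t.length) rest := by
  induction t with
  | nil => intro c rest; simp
  | cons x t ih =>
    intro c rest
    have hx : x = true := ht x (by simp)
    subst hx
    have := ih (fun y hy => ht y (by simp [hy])) (c + 1) rest
    simp only [List.cons_append, best, this, List.length_cons]
    congr 1
    push_cast
    ring

theorem best_run_false (t : List Bool) (ht : ∀ x ∈ t, x = false) :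
    ∀ rest : List Bool, best 0 (t ++ rest) = best 0 rest := by
  induction t with
  | nil => intro rest; simp
  | cons x t ih =>
    intro rest
    have hx : x = false := ht x (by simp)
    subst hx
    have h := ih (fun y hy => ht y (by simp [hy])) rest
    have hge := best_ge (t ++ rest) (0 : Int)
    simp only [List.cons_append, best, h]
    omega

theorem maxgetD_cons (x : Int) (l : List Int) (hx : 0 ≤ x) :
    (PySem.List.max? (x :: l) (fun y => y)).getD 0 = max x ((PySem.List.max? l (fun y => y)).getD 0) := by
  cases l with
  | nil =>
    rw [PySem.List.max?_id_cons]
    simp [PySem.List.max?]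
    omega
  | cons y l =>
    rw [PySem.List.max?_id_cons, PySem.List.max?_id_cons]
    simp only [Option.getD_some, List.foldl_cons]
    -- foldl max (max x y) l = max x (foldl max y l)
    have key : ∀ (l : List Int) (a b : Int), l.foldl max (max a b) = max a (l.foldl max b) := by
      intro l
      induction l with
      | nil => intro a b; rfl
      | cons z l ih =>
        intro a b
        simp only [List.foldl_cons, max_assoc, ih]
    exact key l x y

theorem bRuns_nil : bRuns [] = [] := by rw [bRuns.eq_def]

theorem bRuns_cons (b : Bool) (bs : List Bool) :
    bRuns (b :: bs) = (b, (bs.takeWhile (· == b)).length + 1) :: bRuns (bs.dropWhile (· == b)) := by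
  rw [bRuns.eq_def]

theorem best_eq_bVal (bs : List Bool) : best 0 bs = bVal bs := by
  induction hn : bs.length using Nat.strong_induction_on generalizing bs with
  | _ n ih =>
  cases bs with
  | nil => simp [best, bVal, bRuns_nil, PySem.List.max?]
  | cons b bs' =>
    have hsplit : bs'.takeWhile (· == b) ++ bs'.dropWhile (· == b) = bs' :=
      List.takeWhile_append_dropWhile
    have hlenr : (bs'.dropWhile (· == b)).length < n := by
      have := List.length_dropWhile_le (· == b) bs'
      simp at hn; omega
    have ihr := ih _ hlenr (bs'.dropWhile (· == b)) rfl
    cases b with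
    | true =>
      have ht : ∀ x ∈ bs'.takeWhile (· == true), x = true := by
        intro x hx; simpa using List.mem_takeWhile_imp hx
      -- best side
      have hb1 : best 0 (true :: bs') = best (1 + (bs'.takeWhile (· == true)).length)
          (bs'.dropWhile (· == true)) := by
        conv_lhs => rw [← hsplit]
        simp only [best, best_run_true _ ht]
        ring_nf
      have hb2 : best (1 + (bs'.takeWhile (· == true)).length) (bs'.dropWhile (· == true))
          = max (((bs'.takeWhile (· == true)).length : Int) + 1) (best 0 (bs'.dropWhile (· == true))) := by
        cases hr : bs'.dropWhile (· == true) with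
        | nil =>
          simp only [best]
          have : (0:Int) ≤ (bs'.takeWhile (· == true)).length := by positivity
          omega
        | cons x r' =>
          have hx : x = false := by
            have hw : bs'.dropWhile (· == true) ≠ [] := by
              rw [hr]; exact List.cons_ne_nil _ _
            have h2 := List.head_dropWhile_not (· == true) hw
            simp only [hr, List.head_cons] at h2
            simpa using h2
          subst hx
          have hge := best_ge r' (0 : Int)
          have hL : (0 : Int) ≤ (bs'.takeWhile (· == true)).length := by positivity
          simp only [best]
          simp only [max_def]
          split_ifs <;> omega
      -- bVal side
      have hv : bVal (true :: bs') = max (((bs'.takeWhile (· == true)).length : Int) + 1)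
          (bVal (bs'.dropWhile (· == true))) := by
        simp only [bVal, bRuns_cons, List.filter_cons, reduceIte, List.map_cons]
        rw [maxgetD_cons _ _ (by push_cast; omega)]
        push_cast
        ring_nf
      rw [hb1, hb2, hv, ihr]
    | false =>
      have ht : ∀ x ∈ bs'.takeWhile (· == false), x = false := by
        intro x hx; simpa using List.mem_takeWhile_imp hx
      have hb : best 0 (false :: bs') = best 0 (bs'.dropWhile (· == false)) := by
        have hge := best_ge bs' (0 : Int)
        conv_lhs => rw [← hsplit]
        simp only [best, best_run_false _ ht]
        have hge2 := best_ge (bs'.dropWhile (· == false)) (0 : Int)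
        omega
      have hv : bVal (false :: bs') = bVal (bs'.dropWhile (· == false)) := by
        simp only [bVal, bRuns_cons, List.filter_cons, Bool.false_eq_true, reduceIte]
      rw [hb, hv, ihr]

theorem foldl_trades_eq (trades : List (List (String × Int))) :
    trades.foldl
      (fun (s : Int × Int) trade =>
        if (PySem.Dict.mk trade).getD "pnl" (0 : Int) > 0 then
          (max s.1 (s.2 + 1), s.2 + 1)
        else
          (s.1, 0)) (0, 0)
    = (trades.map (fun t => decide ((PySem.Dict.mk t).getD "pnl" (0 : Int) > 0))).foldl bStep (0, 0) := by
  rw [List.foldl_map]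
  congr 1
  funext s t
  by_cases h : (PySem.Dict.mk t).getD "pnl" (0 : Int) > 0 <;> simp [bStep, h]

-- ===== VERDICT (by name: the statement is the Claim_ definition above) =====
theorem calculate_win_streak_py_spec : Claim_equal_calculate_win_streak_py := by
  intro trades _
  unfold Spec_calculate_win_streak_py
  have halt : calculate_win_streak_py_alt trades
      = bVal (trades.map (fun t => decide ((PySem.Dict.mk t).getD "pnl" (0 : Int) > 0))) := rfl
  rw [halt]
  unfold calculate_win_streak_py
  by_cases hemp : trades = []
  · subst hemp
    simp [bVal, bRuns_nil, PySem.List.max?]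
  · rw [if_neg hemp, foldl_trades_eq,
      foldA_eq _ 0 0 le_rfl le_rfl, ← best_eq_bVal]
    have hge := best_ge (trades.map (fun t => decide ((PySem.Dict.mk t).getD "pnl" (0 : Int) > 0))) (0 : Int)
    omega
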